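-- pv_equiv track=rewrite | github.com/emcramer/pressure_ulcer_prediction_mimic | additional/data_processing_scripts/Labs_chart_events_preprocessing.py | process_ventilator
-- ===== SOURCE A (Python) =====
-- def process_ventilator(ventilator_strings):
-- 	ventilator_value = 0
-- 	for value in ventilator_strings:
-- 		if 'CPAP' in value:
-- 			ventilator_value = 1
-- 		elif value:
-- 			ventilator_value = 2
-- 			break
-- 	return ventilator_value
-- ===== SOURCE B (Python) =====
-- def process_ventilator(ventilator_strings):
--     # A's early-break return is always 2, so order is irrelevant: three-way existence test.
--     # Membership is evaluated before the truthiness test so non-string elements raise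
--     # TypeError exactly where A's `'CPAP' in value` would.
--     if any(('CPAP' not in v) and v for v in ventilator_strings):
--         return 2
--     if any('CPAP' in v for v in ventilator_strings):
--         return 1
--     return 0
-- ===== Notes on version B (the rewrite author's own statement) =====
-- stated objective: simpler
-- what changed: Replaced the stateful loop with early break by two any(...) existence passes: return 2 if some element is non-empty without 'CPAP', 1 if some element contains 'CPAP', else 0 (order is irrelevant since A's break path always returns 2).
import Mathlib
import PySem

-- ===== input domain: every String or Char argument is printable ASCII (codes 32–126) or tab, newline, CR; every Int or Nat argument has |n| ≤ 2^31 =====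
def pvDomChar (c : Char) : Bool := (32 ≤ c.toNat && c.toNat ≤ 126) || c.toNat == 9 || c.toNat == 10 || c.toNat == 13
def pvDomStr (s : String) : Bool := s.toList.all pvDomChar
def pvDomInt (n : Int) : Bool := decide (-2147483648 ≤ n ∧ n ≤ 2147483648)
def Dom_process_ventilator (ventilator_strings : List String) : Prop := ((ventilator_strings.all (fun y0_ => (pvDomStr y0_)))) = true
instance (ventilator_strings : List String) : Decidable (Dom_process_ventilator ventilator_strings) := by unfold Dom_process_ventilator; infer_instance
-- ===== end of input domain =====

-- B replaces A's stateful loop (with early break) by two any-existence passes; objective: simpler.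

-- ===== PORT A =====
-- the loop with accumulator `ventilator_value`; the `break` ends the loop returning 2
def pvA_loop : List String → Int → Int
  | [], acc => acc
  | v :: rest, acc =>
    if PySem.Str.isIn "CPAP" v then pvA_loop rest 1
    else if v ≠ "" then 2
    else pvA_loop rest acc

def process_ventilator (ventilator_strings : List String) : Int :=
  pvA_loop ventilator_strings 0

-- ===== PORT B =====
def process_ventilator_alt (ventilator_strings : List String) : Int :=
  if ventilator_strings.any (fun v => !PySem.Str.isIn "CPAP" v && !(v == "")) then 2
  else if ventilator_strings.any (fun v => PySem.Str.isIn "CPAP" v) then 1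
  else 0

-- ===== PRECONDITION & SPEC =====
def Spec_process_ventilator (ventilator_strings : List String) (out : Int) : Prop := out = process_ventilator_alt ventilator_strings
instance (ventilator_strings : List String) (out : Int) : Decidable (Spec_process_ventilator ventilator_strings out) := by unfold Spec_process_ventilator; infer_instance

-- ===== CLAIM (what is proved, stated in full; the proofs are below) =====
def Claim_equal_process_ventilator : Prop := ∀ (ventilator_strings : List String), Dom_process_ventilator ventilator_strings → Spec_process_ventilator ventilator_strings (process_ventilator ventilator_strings)

-- ===== LEMMAS AND PROOFS =====
theorem pvA_loop_char (l : List String) (acc : Int) (hacc : acc = 0 ∨ acc = 1) :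
    pvA_loop l acc =
      if l.any (fun v => !PySem.Str.isIn "CPAP" v && !(v == "")) then 2
      else if l.any (fun v => PySem.Str.isIn "CPAP" v) then 1
      else acc := by
  induction l generalizing acc with
  | nil => simp [pvA_loop]
  | cons v rest ih =>
    rw [pvA_loop]
    cases hc : PySem.Str.isIn "CPAP" v with
    | true =>
      rw [if_pos rfl, ih 1 (Or.inr rfl)]
      simp only [List.any_cons, hc, Bool.not_true, Bool.false_and, Bool.false_or, Bool.true_or,
        if_true]
      split_ifs <;> rfl
    | false =>
      rw [if_neg (by simp)]
      by_cases hv : v = ""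
      · subst hv
        rw [if_neg (by simp), ih acc hacc]
        simp only [List.any_cons, hc, Bool.not_false, Bool.false_or,
          show ("" == "") = true from rfl, Bool.not_true, Bool.and_false]
      · rw [if_pos hv]
        have hv' : (v == "") = false := by simpa using hv
        simp only [List.any_cons, hc, Bool.not_false, Bool.true_and, hv', Bool.true_or, if_true]

-- ===== VERDICT (by name: the statement is the Claim_ definition above) =====
theorem process_ventilator_spec : Claim_equal_process_ventilator := by
  intro l _
  unfold Spec_process_ventilator process_ventilator process_ventilator_alt
  rw [pvA_loop_char l 0 (Or.inl rfl)]
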